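-- pv_equiv track=rewrite | github.com/EdinburghGenomics/Analysis-Driver | utils/create_bcl2fastq_PBS.py | generate_mask
-- ===== SOURCE A (Python) =====
-- def generate_mask(mask):
--     """
--     Generate the mask as it is understood by BCL2FASTQ
--     INPUT: A mask list with made of triplets
--     OUTPUT: Mask string ready for BCL2FASTQ
--
--     The string is built in reverse, so we can easily remove the last base
--     :param mask: a list of triplets:
--     :return:
--     """
--
--     chain = []
--
--     # mask is a list of triplets, so we reverse step in threes
--     current_read_number = 0
--     for i in range(len(mask) - 3, -1, -3):
--
--         read_number = mask[i]
--         num_cycles = mask[i + 1]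
--         is_indexed_read = mask[i + 2]
--
--         # build the mask string in reverse
--         end_char = ''
--         if read_number != current_read_number:
--             # new read
--             current_read_number = read_number
--             num_cycles = str(int(num_cycles) - 1)
--             end_char = 'n'
--
--         mask_part = num_cycles+end_char
--
--         if is_indexed_read.lower() == 'n':
--             mask_part = 'y' + mask_part
--         else:
--             mask_part = 'i' + mask_part
--
--         chain.append(mask_part)
--
--     return ','.join(chain[::-1])
-- ===== SOURCE B (Python) =====
-- def generate_mask(mask):
--     """Forward single pass: a triplet is the last of its run of equal read
--     numbers iff lookahead mask[i+3] differs (or runs off the end); no reversal."""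
--     n = len(mask)
--     parts = []
--     for i in range(n % 3, n, 3):
--         read_number, num_cycles, is_indexed_read = mask[i], mask[i + 1], mask[i + 2]
--         if i + 3 >= n or mask[i + 3] != read_number:
--             part = str(int(num_cycles) - 1) + 'n'
--         else:
--             part = num_cycles
--         parts.append(('y' if is_indexed_read.lower() == 'n' else 'i') + part)
--     return ','.join(parts)
-- ===== Notes on version B (the rewrite author's own statement) =====
-- stated objective: simpler
-- what changed: Replaces the backward fold that threads a current_read_number state and reverses the accumulated chain at the end by a single forward pass (start len(mask)%3, step 3) that decides 'last triplet of its run' locally by one-element lookahead and joins the parts directly, with no state and no reversal.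
import Mathlib
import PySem

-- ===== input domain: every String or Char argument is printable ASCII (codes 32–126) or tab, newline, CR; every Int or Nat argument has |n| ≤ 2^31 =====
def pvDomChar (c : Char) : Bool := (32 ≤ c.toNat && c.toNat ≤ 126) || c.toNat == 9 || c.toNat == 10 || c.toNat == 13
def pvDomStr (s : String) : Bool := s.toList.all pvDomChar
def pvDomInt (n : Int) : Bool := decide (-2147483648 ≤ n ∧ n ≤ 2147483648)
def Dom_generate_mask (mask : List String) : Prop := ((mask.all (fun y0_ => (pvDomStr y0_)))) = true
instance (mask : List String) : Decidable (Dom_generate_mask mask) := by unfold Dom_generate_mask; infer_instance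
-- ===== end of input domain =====

-- B replaces A's backward stateful fold plus final reversal by a stateless forward pass
-- with one-element lookahead (objective: simpler). Return value only; neither mutates its argument.

-- ===== PORT A =====
-- Python's current_read_number starts as the int 0 and afterwards holds a string from mask;
-- we model it as Option String (none = the initial 0, which never equals a string).
def pvStepA (mask : List String) (st : Option String × List String) (i : Int) :
    Option String × List String :=
  let read_number := PySem.List.pyGetD mask i ""
  let num_cycles := PySem.List.pyGetD mask (i + 1) ""
  let is_indexed_read := PySem.List.pyGetD mask (i + 2) ""
  -- if read_number != current_read_number  (int() is total under Pre_; the getD 0 is never read otherwise)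
  let (current, num_cycles', end_char) :=
    if some read_number ≠ st.1 then
      (some read_number, PySem.Int.toStr ((PySem.Int.ofStr? num_cycles).getD 0 - 1), "n")
    else (st.1, num_cycles, "")
  let mask_part := num_cycles' ++ end_char
  let mask_part := if PySem.Str.lower is_indexed_read = "n" then "y" ++ mask_part
                   else "i" ++ mask_part
  (current, st.2 ++ [mask_part])

def generate_mask (mask : List String) : String :=
  let n := PySem.List.len mask
  let res := (PySem.List.pyRange (n - 3) (-1) (-3)).foldl (pvStepA mask) (none, [])
  PySem.Str.join "," ((PySem.List.slice? res.2 none none (-1)).getD [])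

-- ===== PORT B =====
def pvPartB (mask : List String) (n i : Int) : String :=
  let read_number := PySem.List.pyGetD mask i ""
  let num_cycles := PySem.List.pyGetD mask (i + 1) ""
  let is_indexed_read := PySem.List.pyGetD mask (i + 2) ""
  let part := if n ≤ i + 3 ∨ PySem.List.pyGetD mask (i + 3) "" ≠ read_number then
      PySem.Int.toStr ((PySem.Int.ofStr? num_cycles).getD 0 - 1) ++ "n"
    else num_cycles
  (if PySem.Str.lower is_indexed_read = "n" then "y" else "i") ++ part

def generate_mask_alt (mask : List String) : String :=
  let n := PySem.List.len mask
  PySem.Str.join ","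
    ((PySem.List.pyRange (PySem.Int.mod n 3) n 3).map (pvPartB mask n))

-- ===== PRECONDITION & SPEC =====
-- Pre_ excludes exactly the inputs on which Python A raises ValueError: some triplet that is
-- the last of its run of equal read numbers has a num_cycles field that is not an int() literal.
def Pre_generate_mask (mask : List String) : Prop :=
  ∀ i ∈ PySem.List.pyRange (PySem.List.len mask - 3) (-1) (-3),
    (PySem.List.len mask ≤ i + 3 ∨
      PySem.List.pyGetD mask (i + 3) "" ≠ PySem.List.pyGetD mask i "") →
    (PySem.Int.ofStr? (PySem.List.pyGetD mask (i + 1) "")).isSome = true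
instance (mask : List String) : Decidable (Pre_generate_mask mask) := by
  unfold Pre_generate_mask; infer_instance

def pvWitness_generate_mask : List String := ["1", "8", "n"]

def Spec_generate_mask (mask : List String) (out : String) : Prop := out = generate_mask_alt mask
instance (mask : List String) (out : String) : Decidable (Spec_generate_mask mask out) := by
  unfold Spec_generate_mask; infer_instance

-- ===== CLAIM (what is proved, stated in full; the proofs are below) =====
def Claim_equal_generate_mask : Prop := ∀ (mask : List String), Dom_generate_mask mask → Pre_generate_mask mask → Spec_generate_mask mask (generate_mask mask)

-- ===== LEMMAS AND PROOFS =====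

-- normal form of range(a, -1, -3) (the library has induction forms only for steps ±1)
theorem pvRange_neg3 (a : Int) :
    PySem.List.pyRange a (-1) (-3)
      = (List.range ((a + 3) / 3).toNat).map (fun k : Nat => a - 3 * (k : Int)) := by
  simp only [PySem.List.pyRange]
  norm_num
  by_cases h : (-1:Int) < a
  · rw [if_pos h]
    have hc : ((a + 1 + 3 - 1) / 3).toNat = ((a + 3) / 3).toNat := by omega
    rw [hc]
    apply List.map_congr_left
    intro k _
    ring
  · rw [if_neg h]
    have hc : ((a + 3) / 3).toNat = 0 := by omega
    rw [hc]
    simp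

theorem pvRange_neg3_nil (a : Int) (h : a < 0) :
    PySem.List.pyRange a (-1) (-3) = [] := by
  rw [pvRange_neg3]
  have hc : ((a + 3) / 3).toNat = 0 := by omega
  rw [hc]
  simp

theorem pvRange_neg3_cons (a : Int) (h : 0 ≤ a) :
    PySem.List.pyRange a (-1) (-3) = a :: PySem.List.pyRange (a - 3) (-1) (-3) := by
  rw [pvRange_neg3, pvRange_neg3]
  have hc : ((a + 3) / 3).toNat = ((a - 3 + 3) / 3).toNat + 1 := by omega
  rw [hc, List.range_succ_eq_map]
  simp only [List.map_cons, List.map_map, Nat.cast_zero, mul_zero, sub_zero]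
  refine List.cons_eq_cons.mpr ⟨rfl, ?_⟩
  apply List.map_congr_left
  intro k _
  simp only [Function.comp_apply]
  push_cast
  ring

-- the descending range is the reverse of B's forward range
theorem pvRevEq (n : Int) (hn : 0 ≤ n) :
    PySem.List.pyRange (n - 3) (-1) (-3)
      = (PySem.List.pyRange (PySem.Int.mod n 3) n 3).reverse := by
  rw [PySem.Int.mod_eq_emod_of_pos (by norm_num), pvRange_neg3,
      PySem.List.pyRange_of_pos _ _ (by norm_num : (0:Int) < 3)]
  have hc1 : ((n - 3 + 3) / 3).toNat = (n / 3).toNat := by omega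
  have hc2 : (if n % 3 < n then ((n - n % 3 + 3 - 1) / 3).toNat else 0) = (n / 3).toNat := by
    split_ifs <;> omega
  rw [hc1, hc2]
  apply List.ext_getElem
  · simp
  · intro k h1 h2
    simp only [List.length_map, List.length_range] at h1 h2
    simp only [List.getElem_reverse, List.getElem_map, List.getElem_range,
      List.length_map, List.length_range]
    omega

-- loop invariant: A's backward fold appends exactly B's parts for the processed indices;
-- the threaded state equals (when a previous triplet exists) that triplet's read number.
theorem pvFoldEq (mask : List String) (n : Int) :
    ∀ (m : Nat) (a : Int) (c : Option String) (acc : List String),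
      a < 3 * m → a + 3 ≤ n →
      ((n ≤ a + 3 ∧ c = none) ∨
        (a + 3 < n ∧ c = some (PySem.List.pyGetD mask (a + 3) ""))) →
      ((PySem.List.pyRange a (-1) (-3)).foldl (pvStepA mask) (c, acc)).2
        = acc ++ (PySem.List.pyRange a (-1) (-3)).map (pvPartB mask n) := by
  intro m
  induction m with
  | zero => intro a c acc ha _ _; rw [pvRange_neg3_nil a (by omega)]; simp
  | succ m ih =>
    intro a c acc ha hle hc
    by_cases h0 : a < 0
    · rw [pvRange_neg3_nil a h0]; simp
    · rw [pvRange_neg3_cons a (by omega)]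
      have hbound : (some (PySem.List.pyGetD mask a "") ≠ c) ↔
          (n ≤ a + 3 ∨ PySem.List.pyGetD mask (a + 3) "" ≠ PySem.List.pyGetD mask a "") := by
        rcases hc with ⟨h1, h2⟩ | ⟨h1, h2⟩
        · subst h2
          constructor
          · intro _; exact Or.inl h1
          · intro _; simp
        · subst h2
          constructor
          · intro h
            right
            intro he
            exact h (congrArg some he.symm)
          · rintro (h | h)
            · omega
            · intro he
              exact h (Option.some.inj he).symm
      have hstep : pvStepA mask (c, acc) a
          = (some (PySem.List.pyGetD mask a ""), acc ++ [pvPartB mask n a]) := by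
        by_cases hb : n ≤ a + 3 ∨ PySem.List.pyGetD mask (a + 3) "" ≠ PySem.List.pyGetD mask a ""
        · have hu : some (PySem.List.pyGetD mask a "") ≠ c := hbound.mpr hb
          simp only [pvStepA, pvPartB, if_pos hu, if_pos hb]
          split_ifs <;> rfl
        · have hu : ¬ (some (PySem.List.pyGetD mask a "") ≠ c) := fun h => hb (hbound.mp h)
          have hceq : c = some (PySem.List.pyGetD mask a "") := (not_not.mp hu).symm
          simp only [pvStepA, pvPartB, if_neg hu, if_neg hb]
          rw [hceq]
          simp only [String.append_empty]
          split_ifs <;> rfl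
      rw [List.foldl_cons, hstep]
      rw [ih (a - 3) (some (PySem.List.pyGetD mask a "")) (acc ++ [pvPartB mask n a])
        (by omega) (by omega)
        (Or.inr ⟨by omega, by norm_num⟩)]
      simp

-- ===== VERDICT (by name: the statement is the Claim_ definition above) =====
theorem generate_mask_spec : Claim_equal_generate_mask := by
  intro mask _ _
  unfold Spec_generate_mask
  simp only [generate_mask, generate_mask_alt, PySem.List.slice?_none_none_neg_one,
    Option.getD_some]
  have hn : (0:Int) ≤ PySem.List.len mask := by
    rw [PySem.List.len_eq]; exact_mod_cast Nat.zero_le _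
  set n := PySem.List.len mask with hdef
  rw [pvFoldEq mask n ((n / 3).toNat + 1) (n - 3) none [] (by omega) (by omega)
    (Or.inl ⟨by omega, rfl⟩)]
  rw [List.nil_append, pvRevEq n hn, List.map_reverse, List.reverse_reverse]
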